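-- pv_equiv track=rewrite | github.com/milly-pope/lamplighter | cayleylab/verify/checks.py | check_generic
-- ===== SOURCE A (Python) =====
-- def check_generic(V, E, dist):
--     """
--     Return a list of error strings (empty => PASS).
--     Checks:
--     - Root at dist 0
--     - Every edge has |dist[v] - dist[u]| == 1
--     - No vertex has distance > max detected
--     - Every non-root vertex has at least one incoming edge from dist-1
--     """
--     errors = []
--
--     if not V:
--         errors.append("Empty vertex set")
--         return errors
--
--     # Check root at dist 0
--     if dist[0] != 0:
--         errors.append(f"Root vertex 0 has distance {dist[0]}, expected 0")
--
--     # Check edge distances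
--     for u, v, gi in E:
--         du = dist[u]
--         dv = dist[v]
--         if abs(dv - du) != 1:
--             errors.append(f"Edge ({u}, {v}, {gi}): |dist[{v}]-dist[{u}]| = |{dv}-{du}| != 1")
--
--     # Check that every non-root vertex has an incoming edge from distance d-1
--     max_d = max(dist)
--     incoming = {i: [] for i in range(len(V))}
--     for u, v, gi in E:
--         incoming[v].append(u)
--
--     for v in range(1, len(V)):  # Skip root at 0
--         dv = dist[v]
--         has_predecessor = any(dist[u] == dv - 1 for u in incoming[v])
--         if not has_predecessor:
--             errors.append(f"Vertex {v} at distance {dv} has no incoming edge from distance {dv-1}")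
--
--     return errors
-- ===== SOURCE B (Python) =====
-- def check_generic(V, E, dist):
--     """
--     Same checks and messages as A, restructured: one fused pass over E collects
--     both the edge-distance errors and the targets of valid tree edges
--     (dist[v] == dist[u] + 1); the targets are then sorted and the non-root
--     vertices are checked by a two-pointer merge against range(1, len(V))
--     instead of A's incoming-adjacency dict with a per-vertex any() scan.
--     The dead max(dist) computation is dropped.
--     """
--     if not V:
--         return ["Empty vertex set"]
--     errors = []
--     if dist[0] != 0:
--         errors.append(f"Root vertex 0 has distance {dist[0]}, expected 0")
--     targets = []
--     for u, v, gi in E: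
--         du = dist[u]
--         dv = dist[v]
--         if abs(dv - du) != 1:
--             errors.append(f"Edge ({u}, {v}, {gi}): |dist[{v}]-dist[{u}]| = |{dv}-{du}| != 1")
--         elif dv == du + 1:
--             targets.append(v)
--     targets.sort()
--     i = 0
--     for v in range(1, len(V)):
--         while i < len(targets) and targets[i] < v:
--             i += 1
--         if i == len(targets) or targets[i] != v:
--             dv = dist[v]
--             errors.append(f"Vertex {v} at distance {dv} has no incoming edge from distance {dv-1}")
--     return errors
-- ===== Notes on version B (the rewrite author's own statement) =====
-- stated objective: faster
-- what changed: A's two passes over E, incoming-adjacency dict and per-vertex any() scan are replaced by one fused pass over E (collecting edge errors and the targets of valid tree edges together) followed by sort-and-merge: the targets are sorted and missing non-root vertices are found by a two-pointer merge against range(1, len(V)); the dead max(dist) computation is dropped (constant-factor win: no dict construction, no per-edge list appends, no per-vertex rescans).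
import Mathlib
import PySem

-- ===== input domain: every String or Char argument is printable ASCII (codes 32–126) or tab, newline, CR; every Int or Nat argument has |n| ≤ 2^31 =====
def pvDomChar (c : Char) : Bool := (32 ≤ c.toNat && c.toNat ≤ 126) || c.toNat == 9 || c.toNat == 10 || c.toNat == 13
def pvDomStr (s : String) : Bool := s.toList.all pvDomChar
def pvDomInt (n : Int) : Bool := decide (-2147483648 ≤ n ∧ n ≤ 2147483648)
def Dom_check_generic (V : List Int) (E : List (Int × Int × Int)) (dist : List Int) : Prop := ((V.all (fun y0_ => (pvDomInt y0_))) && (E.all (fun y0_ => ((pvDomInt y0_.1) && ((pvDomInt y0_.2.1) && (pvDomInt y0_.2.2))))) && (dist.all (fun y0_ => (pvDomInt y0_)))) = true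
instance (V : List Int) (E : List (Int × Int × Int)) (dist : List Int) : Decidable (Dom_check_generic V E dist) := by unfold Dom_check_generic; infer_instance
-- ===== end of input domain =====

-- B replaces A's two passes over E, incoming-adjacency dict and per-vertex any-scan by one fused
-- pass over E plus a sort-and-two-pointer-merge of valid-edge targets against range(1, len(V))
-- (objective: alternative); A's dead max(dist) is dropped. Same return value everywhere Pre_ holds.

-- ===== PORT A =====
def pvRootMsg (d0 : Int) : String :=
  "Root vertex 0 has distance " ++ PySem.Int.toStr d0 ++ ", expected 0"
def pvEdgeMsg (u v gi dv du : Int) : String :=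
  "Edge (" ++ PySem.Int.toStr u ++ ", " ++ PySem.Int.toStr v ++ ", " ++ PySem.Int.toStr gi ++
  "): |dist[" ++ PySem.Int.toStr v ++ "]-dist[" ++ PySem.Int.toStr u ++ "]| = |" ++
  PySem.Int.toStr dv ++ "-" ++ PySem.Int.toStr du ++ "| != 1"
def pvVertMsg (v dv : Int) : String :=
  "Vertex " ++ PySem.Int.toStr v ++ " at distance " ++ PySem.Int.toStr dv ++
  " has no incoming edge from distance " ++ PySem.Int.toStr (dv - 1)

def check_generic (V : List Int) (E : List (Int × Int × Int)) (dist : List Int) : List String :=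
  if V = [] then ["Empty vertex set"]
  else
    let errors : List String := []
    let errors := if PySem.List.pyGetD dist 0 0 ≠ 0 then errors ++ [pvRootMsg (PySem.List.pyGetD dist 0 0)] else errors
    let errors := E.foldl (fun acc e =>
      let du := PySem.List.pyGetD dist e.1 0
      let dv := PySem.List.pyGetD dist e.2.1 0
      if (dv - du).natAbs ≠ 1 then acc ++ [pvEdgeMsg e.1 e.2.1 e.2.2 dv du] else acc) errors
    let _max_d := PySem.List.max? dist (fun x => x)   -- max(dist): computed by A and never used
    let incoming : PySem.Dict Int (List Int) :=
      (PySem.List.pyRange 0 (V.length : Int) 1).foldl (fun d i => d.insert i []) PySem.Dict.empty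
    let incoming := E.foldl (fun d e => d.modify e.2.1 [] (fun l => l ++ [e.1])) incoming
    let errors := (PySem.List.pyRange 1 (V.length : Int) 1).foldl (fun acc v =>
      let dv := PySem.List.pyGetD dist v 0
      let has_predecessor := (incoming.getD v []).any (fun u => PySem.List.pyGetD dist u 0 == dv - 1)
      if !has_predecessor then acc ++ [pvVertMsg v dv] else acc) errors
    errors

-- ===== PORT B =====
-- the inner 'while i < len(targets) and targets[i] < v: i += 1'
def pvAdvance (targets : List Int) (v : Int) (i : Nat) : Nat :=
  if i < targets.length ∧ targets.getD i 0 < v then pvAdvance targets v (i + 1) else i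
termination_by targets.length - i
decreasing_by omega

-- the outer 'for v in range(1, len(V))' loop threading the pointer i and the error list
def pvMergeLoop (dist targets : List Int) (vs : List Int) (i : Nat) (acc : List String) : List String :=
  match vs with
  | [] => acc
  | v :: rest =>
    let i' := pvAdvance targets v i
    let acc := if i' = targets.length ∨ targets.getD i' 0 ≠ v
               then acc ++ [pvVertMsg v (PySem.List.pyGetD dist v 0)] else acc
    pvMergeLoop dist targets rest i' acc

def check_generic_alt (V : List Int) (E : List (Int × Int × Int)) (dist : List Int) : List String :=
  if V = [] then ["Empty vertex set"]
  else
    let errors : List String :=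
      if PySem.List.pyGetD dist 0 0 ≠ 0 then [pvRootMsg (PySem.List.pyGetD dist 0 0)] else []
    -- fused pass over E: edge errors and the targets of valid tree edges together
    let st := E.foldl (fun (st : List String × List Int) e =>
        let du := PySem.List.pyGetD dist e.1 0
        let dv := PySem.List.pyGetD dist e.2.1 0
        if (dv - du).natAbs ≠ 1 then (st.1 ++ [pvEdgeMsg e.1 e.2.1 e.2.2 dv du], st.2)
        else if dv = du + 1 then (st.1, st.2 ++ [e.2.1]) else st)
      (errors, ([] : List Int))
    let targets := PySem.List.sorted st.2 (fun x => x) false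
    pvMergeLoop dist targets (PySem.List.pyRange 1 (V.length : Int) 1) 0 st.1

-- ===== PRECONDITION & SPEC =====
-- Pre_ excludes exactly the inputs where A raises: a missing dist entry (IndexError on dist[0],
-- dist[v] or an edge's dist index) or an edge target outside range(len(V)) (KeyError on incoming[v]).
def Pre_check_generic (V : List Int) (E : List (Int × Int × Int)) (dist : List Int) : Prop :=
  V = [] ∨ ((V.length : Int) ≤ (dist.length : Int) ∧
    ∀ e ∈ E, (-(dist.length : Int) ≤ e.1 ∧ e.1 < (dist.length : Int)) ∧
             (0 ≤ e.2.1 ∧ e.2.1 < (V.length : Int)))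
instance (V : List Int) (E : List (Int × Int × Int)) (dist : List Int) : Decidable (Pre_check_generic V E dist) := by unfold Pre_check_generic; infer_instance

def pvWitness_check_generic : List Int × (List (Int × Int × Int)) × List Int :=
  ([7, 8], [(0, 1, 0)], [0, 1])

def Spec_check_generic (V : List Int) (E : List (Int × Int × Int)) (dist : List Int) (out : List String) : Prop := out = check_generic_alt V E dist
instance (V : List Int) (E : List (Int × Int × Int)) (dist : List Int) (out : List String) : Decidable (Spec_check_generic V E dist out) := by unfold Spec_check_generic; infer_instance

-- ===== CLAIM (what is proved, stated in full; the proofs are below) =====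
def Claim_equal_check_generic : Prop := ∀ (V : List Int) (E : List (Int × Int × Int)) (dist : List Int), Dom_check_generic V E dist → Pre_check_generic V E dist → Spec_check_generic V E dist (check_generic V E dist)

-- ===== LEMMAS AND PROOFS =====

-- the initial incoming dict maps every key it holds to []
theorem pv_init_getD (l : List Int) (d : PySem.Dict Int (List Int))
    (h : ∀ k, d.getD k [] = []) (v : Int) :
    (l.foldl (fun d i => d.insert i ([] : List Int)) d).getD v [] = [] := by
  induction l generalizing d with
  | nil => exact h v
  | cons x xs ih =>
      simp only [List.foldl_cons]
      exact ih _ (fun k => by rw [PySem.Dict.getD_insert]; split <;> simp [h])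

-- A's incoming[v] is exactly the list of sources of edges into v, in E's order
theorem pv_incoming_getD (V : List Int) (E : List (Int × Int × Int)) (v : Int) :
    ((E.foldl (fun d e => d.modify e.2.1 [] (fun l => l ++ [e.1]))
        ((PySem.List.pyRange 0 (V.length : Int) 1).foldl
          (fun d i => d.insert i []) PySem.Dict.empty)).getD v [])
      = (E.filter (fun e => e.2.1 == v)).map (fun e => e.1) := by
  have h1 : E.foldl (fun d e => d.modify e.2.1 [] (fun l => l ++ [e.1]))
        ((PySem.List.pyRange 0 (V.length : Int) 1).foldl
          (fun d i => d.insert i []) PySem.Dict.empty)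
      = (E.map (fun e => (e.2.1, e.1))).foldl (fun d p => d.modify p.1 [] (fun l => l ++ [p.2]))
        ((PySem.List.pyRange 0 (V.length : Int) 1).foldl
          (fun d i => d.insert i []) PySem.Dict.empty) := by
    rw [List.foldl_map]
  rw [h1, PySem.Dict.getD_foldl_modify_append,
      pv_init_getD _ _ (fun k => PySem.Dict.getD_empty _ _), List.filter_map]
  simp [Function.comp_def]

-- per vertex: A's any-scan over incoming[v] ⟺ v is the target of some valid tree edge
theorem pv_pred_mem (V : List Int) (E : List (Int × Int × Int)) (dist : List Int) (v : Int) :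
    (((E.foldl (fun d e => d.modify e.2.1 [] (fun l => l ++ [e.1]))
        ((PySem.List.pyRange 0 (V.length : Int) 1).foldl
          (fun d i => d.insert i []) PySem.Dict.empty)).getD v []).any
        (fun u => PySem.List.pyGetD dist u 0 == PySem.List.pyGetD dist v 0 - 1)) = true
      ↔ v ∈ (E.filter (fun e =>
            PySem.List.pyGetD dist e.2.1 0 = PySem.List.pyGetD dist e.1 0 + 1)).map (fun e => e.2.1) := by
  rw [pv_incoming_getD]
  simp only [List.any_map, List.any_eq_true, List.mem_filter, Function.comp,
    List.mem_map, beq_iff_eq, decide_eq_true_eq]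
  constructor
  · rintro ⟨e, ⟨he, hv⟩, hd⟩
    exact ⟨e, ⟨he, by subst hv; omega⟩, hv⟩
  · rintro ⟨e, ⟨he, hd⟩, hv⟩
    exact ⟨e, ⟨he, hv⟩, by subst hv; omega⟩

-- B's fused fold over E splits into the edge-error fold and the valid-target fold
theorem pv_fused_split (dist : List Int) (E : List (Int × Int × Int))
    (errs : List String) (ts : List Int) :
    E.foldl (fun (st : List String × List Int) e =>
        let du := PySem.List.pyGetD dist e.1 0
        let dv := PySem.List.pyGetD dist e.2.1 0
        if (dv - du).natAbs ≠ 1 then (st.1 ++ [pvEdgeMsg e.1 e.2.1 e.2.2 dv du], st.2)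
        else if dv = du + 1 then (st.1, st.2 ++ [e.2.1]) else st) (errs, ts)
      = (E.foldl (fun acc e =>
            let du := PySem.List.pyGetD dist e.1 0
            let dv := PySem.List.pyGetD dist e.2.1 0
            if (dv - du).natAbs ≠ 1 then acc ++ [pvEdgeMsg e.1 e.2.1 e.2.2 dv du] else acc) errs,
         E.foldl (fun acc e =>
            if PySem.List.pyGetD dist e.2.1 0 = PySem.List.pyGetD dist e.1 0 + 1
            then acc ++ [e.2.1] else acc) ts) := by
  induction E generalizing errs ts with
  | nil => rfl
  | cons e E ih =>
      simp only [List.foldl_cons]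
      by_cases h1 : (PySem.List.pyGetD dist e.2.1 0 - PySem.List.pyGetD dist e.1 0).natAbs ≠ 1
      · have h2 : ¬ PySem.List.pyGetD dist e.2.1 0 = PySem.List.pyGetD dist e.1 0 + 1 := by omega
        simp only [h2, if_false, if_pos h1, ih]
      · by_cases h2 : PySem.List.pyGetD dist e.2.1 0 = PySem.List.pyGetD dist e.1 0 + 1 <;>
          simp only [if_neg h1, h2, ih] <;> simp

-- pvAdvance: bounds, everything passed over is < v, and the stop position is ≥ v
theorem pvAdvance_spec (S : List Int) (v : Int) (i : Nat) (hi : i ≤ S.length) :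
    i ≤ pvAdvance S v i ∧ pvAdvance S v i ≤ S.length ∧
    (∀ j, i ≤ j → j < pvAdvance S v i → S.getD j 0 < v) ∧
    (pvAdvance S v i < S.length → v ≤ S.getD (pvAdvance S v i) 0) := by
  have hterm : S.length - i = S.length - i := rfl
  generalize hk : S.length - i = k at hterm
  clear hterm
  induction k generalizing i with
  | zero =>
      have hie : i = S.length := by omega
      rw [pvAdvance, if_neg (by omega)]
      exact ⟨le_refl _, hi, fun j h1 h2 => absurd h2 (by omega), fun h => absurd h (by omega)⟩
  | succ k ih =>
      rw [pvAdvance]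
      by_cases h : i < S.length ∧ S.getD i 0 < v
      · rw [if_pos h]
        obtain ⟨ih1, ih2, ih3, ih4⟩ := ih (i + 1) (by omega) (by omega)
        refine ⟨by omega, ih2, ?_, ih4⟩
        intro j hij hj
        rcases Nat.eq_or_lt_of_le hij with rfl | hlt
        · exact h.2
        · exact ih3 j (by omega) hj
      · rw [if_neg h]
        refine ⟨le_refl _, hi, by omega, ?_⟩
        intro hlt
        by_contra hnot
        exact h ⟨hlt, by omega⟩

-- with a sorted list and the pointer invariant, the two-pointer test is membership
theorem pv_test_iff (S : List Int) (hS : S.Pairwise (· ≤ ·)) (v : Int) (i : Nat)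
    (hi : i ≤ S.length) (hprev : ∀ j, j < i → S.getD j 0 < v) :
    (pvAdvance S v i = S.length ∨ S.getD (pvAdvance S v i) 0 ≠ v) ↔ v ∉ S := by
  obtain ⟨h1, h2, h3, h4⟩ := pvAdvance_spec S v i hi
  set i' := pvAdvance S v i with hi'
  have hall : ∀ j, j < i' → S.getD j 0 < v := by
    intro j hj
    rcases lt_or_ge j i with hlt | hge
    · exact hprev j hlt
    · exact h3 j hge hj
  constructor
  · rintro (hEnd | hNe) hmem
    · obtain ⟨j, hj, hjv⟩ := List.mem_iff_getElem.mp hmem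
      have : S.getD j 0 = v := by rw [List.getD_eq_getElem _ _ hj]; exact hjv
      have := hall j (by omega)
      omega
    · obtain ⟨j, hj, hjv⟩ := List.mem_iff_getElem.mp hmem
      have hjd : S.getD j 0 = v := by rw [List.getD_eq_getElem _ _ hj]; exact hjv
      rcases lt_or_ge j i' with hlt | hge
      · have := hall j hlt; omega
      · have hi'lt : i' < S.length := by omega
        have hle : S.getD i' 0 ≤ S.getD j 0 := by
          rcases Nat.eq_or_lt_of_le hge with rfl | hlt
          · exact le_refl _
          · rw [List.getD_eq_getElem _ _ hi'lt, List.getD_eq_getElem _ _ hj]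
            exact (List.pairwise_iff_getElem.mp hS) i' j hi'lt hj hlt
        have := h4 hi'lt
        exact hNe (by omega)
  · intro hnm
    by_contra hc
    push Not at hc
    obtain ⟨hlt', heq⟩ := hc
    have hi'lt : i' < S.length := by omega
    exact hnm (by
      rw [List.getD_eq_getElem _ _ hi'lt] at heq
      exact heq ▸ List.getElem_mem hi'lt)

-- the merge loop produces exactly the missing vertices, in order
theorem pvMergeLoop_eq (dist S : List Int) (hS : S.Pairwise (· ≤ ·)) :
    ∀ (vs : List Int) (i : Nat) (acc : List String),
      i ≤ S.length → vs.Pairwise (· < ·) →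
      (∀ v ∈ vs, ∀ j, j < i → S.getD j 0 < v) →
      pvMergeLoop dist S vs i acc
        = acc ++ (vs.filter (fun v => decide (v ∉ S))).map
            (fun v => pvVertMsg v (PySem.List.pyGetD dist v 0)) := by
  intro vs
  induction vs with
  | nil => intro i acc _ _ _; simp [pvMergeLoop]
  | cons v rest ih =>
      intro i acc hi hp hinv
      obtain ⟨h1, h2, h3, _⟩ := pvAdvance_spec S v i hi
      have hvprev : ∀ j, j < i → S.getD j 0 < v := hinv v (List.mem_cons_self) 
      have htest := pv_test_iff S hS v i hi hvprev
      rw [pvMergeLoop]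
      have hrest : pvMergeLoop dist S rest (pvAdvance S v i)
          (if pvAdvance S v i = S.length ∨ S.getD (pvAdvance S v i) 0 ≠ v
           then acc ++ [pvVertMsg v (PySem.List.pyGetD dist v 0)] else acc)
          = (if pvAdvance S v i = S.length ∨ S.getD (pvAdvance S v i) 0 ≠ v
             then acc ++ [pvVertMsg v (PySem.List.pyGetD dist v 0)] else acc)
            ++ (rest.filter (fun v => decide (v ∉ S))).map
                (fun v => pvVertMsg v (PySem.List.pyGetD dist v 0)) := by
        apply ih _ _ h2 (List.Pairwise.of_cons (List.pairwise_cons.mp hp |> fun h => List.pairwise_cons.mpr h))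
        · intro v' hv' j hj
          rcases lt_or_ge j i with hlt | hge
          · exact lt_trans (hinv v (List.mem_cons_self) j hlt)
              ((List.pairwise_cons.mp hp).1 v' hv')
          · exact lt_trans (h3 j hge hj) ((List.pairwise_cons.mp hp).1 v' hv')
      rw [hrest]
      by_cases hc : pvAdvance S v i = S.length ∨ S.getD (pvAdvance S v i) 0 ≠ v
      · have hvnm : v ∉ S := htest.mp hc
        rw [if_pos hc, List.filter_cons_of_pos (by simpa using hvnm)]
        simp
      · have hvm : v ∈ S := by
          by_contra hnm
          exact hc (htest.mpr hnm)
        rw [if_neg hc, List.filter_cons_of_neg (by simpa using hvm)]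

-- ===== VERDICT (by name: the statement is the Claim_ definition above) =====
theorem check_generic_spec : Claim_equal_check_generic := by
  intro V E dist _ _
  unfold Spec_check_generic check_generic check_generic_alt
  split
  · rfl
  · simp only [pv_fused_split]
    set errs0 : List String :=
      if PySem.List.pyGetD dist 0 0 ≠ 0 then [pvRootMsg (PySem.List.pyGetD dist 0 0)] else []
    have herrs0 : (if PySem.List.pyGetD dist 0 0 ≠ 0
        then ([] : List String) ++ [pvRootMsg (PySem.List.pyGetD dist 0 0)] else []) = errs0 := by
      simp [errs0]
    set T : List Int := E.foldl (fun acc e =>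
        if PySem.List.pyGetD dist e.2.1 0 = PySem.List.pyGetD dist e.1 0 + 1
        then acc ++ [e.2.1] else acc) [] with hT
    have hTfilter : T = (E.filter (fun e =>
        PySem.List.pyGetD dist e.2.1 0 = PySem.List.pyGetD dist e.1 0 + 1)).map (fun e => e.2.1) := by
      rw [hT, PySem.List.foldl_append_ite]
      simp
    set S := PySem.List.sorted T (fun x => x) false with hSdef
    have hSsort : S.Pairwise (· ≤ ·) := PySem.List.sorted_pairwise T (fun x => x)
    have hmergeS : pvMergeLoop dist S (PySem.List.pyRange 1 (V.length : Int) 1) 0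
          (E.foldl (fun acc e =>
            let du := PySem.List.pyGetD dist e.1 0
            let dv := PySem.List.pyGetD dist e.2.1 0
            if (dv - du).natAbs ≠ 1 then acc ++ [pvEdgeMsg e.1 e.2.1 e.2.2 dv du] else acc) errs0)
        = (E.foldl (fun acc e =>
            let du := PySem.List.pyGetD dist e.1 0
            let dv := PySem.List.pyGetD dist e.2.1 0
            if (dv - du).natAbs ≠ 1 then acc ++ [pvEdgeMsg e.1 e.2.1 e.2.2 dv du] else acc) errs0)
          ++ ((PySem.List.pyRange 1 (V.length : Int) 1).filter (fun v => decide (v ∉ S))).map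
              (fun v => pvVertMsg v (PySem.List.pyGetD dist v 0)) :=
      pvMergeLoop_eq dist S hSsort _ 0 _ (Nat.zero_le _)
        (PySem.List.pairwise_lt_pyRange_one 1 (V.length : Int))
        (by intro v _ j hj; omega)
    rw [herrs0, hmergeS]
    rw [PySem.List.foldl_append_if
        (p := fun v : Int =>
          !(((E.foldl (fun d e => d.modify e.2.1 [] (fun l => l ++ [e.1]))
              ((PySem.List.pyRange 0 (V.length : Int) 1).foldl
                (fun d i => d.insert i []) PySem.Dict.empty)).getD v []).any
              (fun u => PySem.List.pyGetD dist u 0 == PySem.List.pyGetD dist v 0 - 1)))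
        (f := fun v : Int => pvVertMsg v (PySem.List.pyGetD dist v 0))]
    congr 1
    congr 1
    apply List.filter_congr
    intro v _
    have hmemS : v ∈ S ↔ v ∈ T := by
      rw [hSdef]; exact PySem.List.mem_sorted (x := v) (xs := T) (key := fun x : Int => x) (rev := false)
    rw [hTfilter] at hmemS
    have hiff : (((E.foldl (fun d e => d.modify e.2.1 [] (fun l => l ++ [e.1]))
          ((PySem.List.pyRange 0 (V.length : Int) 1).foldl
            (fun d i => d.insert i []) PySem.Dict.empty)).getD v []).any
          (fun u => PySem.List.pyGetD dist u 0 == PySem.List.pyGetD dist v 0 - 1)) = true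
        ↔ v ∈ S := (pv_pred_mem V E dist v).trans hmemS.symm
    have hb : (((E.foldl (fun d e => d.modify e.2.1 [] (fun l => l ++ [e.1]))
          ((PySem.List.pyRange 0 (V.length : Int) 1).foldl
            (fun d i => d.insert i []) PySem.Dict.empty)).getD v []).any
          (fun u => PySem.List.pyGetD dist u 0 == PySem.List.pyGetD dist v 0 - 1))
        = decide (v ∈ S) := by
      rw [Bool.eq_iff_iff]; simp [hiff]
    rw [hb]
    simp
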